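-- pv_equiv track=rewrite | github.com/jw5374/InterviewLIbrary | leet/aBeforeB.py | checkString
-- ===== SOURCE A (Python) =====
-- def checkString(s: str) -> bool:
-- 	if len(s) == 1:
-- 		return True
-- 	[left, right] = [0, len(s)-1]
-- 	while right > 0 and s[right] != "a":
-- 		right -= 1
-- 	if right == 0:
-- 		return True
-- 	while left <= right:
-- 		if s[left] != "a" or s[right] != "a":
-- 			return False
-- 		left += 1
-- 		right -=1
-- 	return True
-- ===== SOURCE B (Python) =====
-- def checkString(s: str) -> bool:
--     seen_other = False
--     for c in s:
--         if c != 'a':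
--             seen_other = True
--         elif seen_other:
--             return False
--     return True
-- ===== Notes on version B (the rewrite author's own statement) =====
-- stated objective: simpler
-- what changed: Replaces A's backward scan for the last occurrence of the letter a plus a two-pointer inward sweep with a single forward pass carrying one boolean seen-other flag.
import Mathlib
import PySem

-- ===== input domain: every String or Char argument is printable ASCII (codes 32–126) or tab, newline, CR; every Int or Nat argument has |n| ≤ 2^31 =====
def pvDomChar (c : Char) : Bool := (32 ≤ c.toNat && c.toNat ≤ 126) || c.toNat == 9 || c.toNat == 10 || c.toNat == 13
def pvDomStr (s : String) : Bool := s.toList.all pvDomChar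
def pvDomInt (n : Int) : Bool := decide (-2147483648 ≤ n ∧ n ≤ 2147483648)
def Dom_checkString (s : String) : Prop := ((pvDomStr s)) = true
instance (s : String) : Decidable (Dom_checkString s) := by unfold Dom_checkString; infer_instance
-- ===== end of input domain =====

-- B replaces A's backward scan for the last 'a' plus a two-pointer inward sweep by a single
-- forward pass with one boolean flag; equivalence is proved for all strings (both are total).

-- ===== PORT A =====
-- first while loop: 'while right > 0 and s[right] != "a": right -= 1'
def pvFindRight (l : List Char) (r : Int) : Int :=
  if h : 0 < r ∧ PySem.List.pyGet? l r ≠ some 'a' then pvFindRight l (r - 1) else r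
termination_by r.toNat
decreasing_by omega

-- second while loop: 'while left <= right: if s[left] != "a" or s[right] != "a": return False; …'
def pvLoop2 (l : List Char) (left right : Int) : Bool :=
  if h : left ≤ right then
    if PySem.List.pyGet? l left ≠ some 'a' ∨ PySem.List.pyGet? l right ≠ some 'a' then false
    else pvLoop2 l (left + 1) (right - 1)
  else true
termination_by (right - left + 2).toNat
decreasing_by omega

def checkString (s : String) : Bool :=
  let l := s.toList
  if (l.length : Int) = 1 then true
  else
    let right := pvFindRight l ((l.length : Int) - 1)
    if right = 0 then true
    else pvLoop2 l 0 right

-- ===== PORT B =====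
def pvScan : List Char → Bool → Bool
  | [], _ => true
  | c :: t, seenOther =>
    if c ≠ 'a' then pvScan t true
    else if seenOther then false
    else pvScan t seenOther

def checkString_alt (s : String) : Bool := pvScan s.toList false

-- ===== PRECONDITION & SPEC =====
def Spec_checkString (s : String) (out : Bool) : Prop := out = checkString_alt s
instance (s : String) (out : Bool) : Decidable (Spec_checkString s out) := by unfold Spec_checkString; infer_instance

-- ===== CLAIM (what is proved, stated in full; the proofs are below) =====
def Claim_equal_checkString : Prop := ∀ (s : String), Dom_checkString s → Spec_checkString s (checkString s)

-- ===== LEMMAS AND PROOFS =====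

-- the common characterisation: some 'a' occurs (strictly) after some non-'a' character
def pvBad (l : List Char) : Prop :=
  ∃ i j : Nat, i < j ∧ j < l.length ∧ l[i]? ≠ some 'a' ∧ l[j]? = some 'a'

lemma pvScan_true (l : List Char) : pvScan l true = true ↔ 'a' ∉ l := by
  induction l with
  | nil => simp [pvScan]
  | cons c t ih =>
    by_cases hc : c = 'a'
    · simp [pvScan, hc]
    · simp only [pvScan, if_pos (by simpa using hc)]
      rw [ih]
      simp only [List.mem_cons]
      constructor
      · intro hna h
        rcases h with h | h
        · exact hc h.symm
        · exact hna h
      · intro h hm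
        exact h (Or.inr hm)

lemma pvScan_false (l : List Char) : pvScan l false = true ↔ ¬ pvBad l := by
  induction l with
  | nil =>
    simp [pvScan, pvBad]
  | cons c t ih =>
    by_cases hc : c = 'a'
    · -- leading 'a': skipped, pvBad shifts
      subst hc
      have hstep : pvScan ('a' :: t) false = pvScan t false := by simp [pvScan]
      rw [hstep, ih]
      constructor
      · rintro hnb ⟨i, j, hij, hj, hi, hja⟩
        match i, j with
        | 0, _ => exact hi (by simp)
        | i+1, j+1 =>
          exact hnb ⟨i, j, by omega, by simpa using hj, by simpa using hi, by simpa using hja⟩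
      · rintro hnb ⟨i, j, hij, hj, hi, hja⟩
        exact hnb ⟨i+1, j+1, by omega, by simpa using hj, by simpa using hi, by simpa using hja⟩
    · -- first non-'a': rest must contain no 'a'
      have hstep : pvScan (c :: t) false = pvScan t true := by
        simp [pvScan, if_pos (by simpa using hc)]
      rw [hstep, pvScan_true]
      constructor
      · rintro hna ⟨i, j, hij, hj, hi, hja⟩
        match j with
        | j+1 =>
          exact hna (List.mem_of_getElem? (show t[j]? = some 'a' by simpa using hja))
      · intro hnb hmem
        obtain ⟨j, hja⟩ := List.getElem?_of_mem hmem
        have hj : j < t.length := (List.getElem?_eq_some_iff.mp hja).1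
        exact hnb ⟨0, j+1, by omega, by simpa using hj, by simp [hc], by simpa using hja⟩

lemma pvFindRight_spec (l : List Char) (r : Int) :
    pvFindRight l r ≤ r ∧
    (0 ≤ r → 0 ≤ pvFindRight l r) ∧
    (pvFindRight l r ≤ 0 ∨ PySem.List.pyGet? l (pvFindRight l r) = some 'a') ∧
    (∀ i : Int, pvFindRight l r < i → i ≤ r → PySem.List.pyGet? l i ≠ some 'a') := by
  fun_induction pvFindRight l r with
  | case1 r h ih =>
    obtain ⟨h1, h2, h3, h4⟩ := ih
    refine ⟨by omega, fun _ => h2 (by omega), h3, ?_⟩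
    intro i hlo hhi
    rcases lt_or_eq_of_le hhi with hlt | rfl
    · exact h4 i hlo (by omega)
    · exact h.2
  | case2 r h =>
    refine ⟨le_refl _, fun h0 => h0, ?_, fun i h1 h2 => absurd (lt_of_lt_of_le h1 h2) (lt_irrefl _)⟩
    by_cases hr : 0 < r
    · right
      by_contra hne
      exact h ⟨hr, hne⟩
    · left; omega

lemma pvLoop2_iff (l : List Char) (left right : Int) :
    pvLoop2 l left right = true ↔
      ∀ i : Int, left ≤ i → i ≤ right → PySem.List.pyGet? l i = some 'a' := by
  fun_induction pvLoop2 l left right with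
  | case1 left right h hbad =>
    refine iff_of_false (by simp) ?_
    intro hall
    rcases hbad with hb | hb
    · exact hb (hall left (le_refl _) h)
    · exact hb (hall right h (le_refl _))
  | case2 left right h hgood ih =>
    have hL := not_not.mp (not_or.mp hgood).1
    have hR := not_not.mp (not_or.mp hgood).2
    rw [ih]
    constructor
    · intro hall i h1 h2
      rcases eq_or_lt_of_le h1 with rfl | h1'
      · exact hL
      rcases eq_or_lt_of_le h2 with rfl | h2'
      · exact hR
      · exact hall i (by omega) (by omega)
    · intro hall i h1 h2
      exact hall i (by omega) (by omega)
  | case3 left right h =>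
    refine iff_of_true rfl ?_
    intro i h1 h2
    omega

lemma checkString_iff (s : String) : checkString s = true ↔ ¬ pvBad s.toList := by
  unfold checkString
  set l := s.toList with hl
  by_cases h1 : (l.length : Int) = 1
  · simp only [if_pos h1, true_iff]
    rintro ⟨i, j, hij, hj, _, _⟩
    omega
  · simp only [if_neg h1]
    obtain ⟨f1, f2, f3, f4⟩ := pvFindRight_spec l ((l.length : Int) - 1)
    set rr := pvFindRight l ((l.length : Int) - 1) with hrr
    by_cases h0 : rr = 0
    · simp only [if_pos h0, true_iff]
      rintro ⟨i, j, hij, hj, hi, hja⟩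
      have : PySem.List.pyGet? l (j : Int) ≠ some 'a' := f4 j (by omega) (by omega)
      rw [PySem.List.pyGet?_natCast] at this
      exact this hja
    · simp only [if_neg h0]
      rw [pvLoop2_iff]
      by_cases hn0 : l.length = 0
      · -- empty string: rr = -1, both sides hold
        constructor
        · rintro _ ⟨i, j, hij, hj, _, _⟩; omega
        · intro _ i h1 h2
          exfalso
          have : rr ≤ (l.length : Int) - 1 := f1
          omega
      · -- here l.length ≥ 2, rr ≥ 1, l[rr] = 'a'
        have hrpos : 0 < rr := by
          have := f2 (by omega)
          omega
        have hra : PySem.List.pyGet? l rr = some 'a' := by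
          rcases f3 with h | h
          · omega
          · exact h
        constructor
        · intro hall
          rintro ⟨i, j, hij, hj, hi, hja⟩
          have hjr : (j : Int) ≤ rr := by
            by_contra hgt
            have : PySem.List.pyGet? l (j : Int) ≠ some 'a' := f4 j (by omega) (by omega)
            rw [PySem.List.pyGet?_natCast] at this
            exact this hja
          have : PySem.List.pyGet? l (i : Int) = some 'a' := hall i (by omega) (by omega)
          rw [PySem.List.pyGet?_natCast] at this
          exact hi this
        · intro hnb i hi0 hir
          by_contra hne
          rcases eq_or_lt_of_le hir with rfl | hlt
          · exact hne hra
          · have hcast : i = ((i.toNat : Nat) : Int) := by omega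
            have hrcast : rr = ((rr.toNat : Nat) : Int) := by omega
            apply hnb
            refine ⟨i.toNat, rr.toNat, by omega, ?_, ?_, ?_⟩
            · have : rr ≤ (l.length : Int) - 1 := f1
              omega
            · rw [hcast, PySem.List.pyGet?_natCast] at hne; exact hne
            · rw [hrcast, PySem.List.pyGet?_natCast] at hra; exact hra

-- ===== VERDICT (by name: the statement is the Claim_ definition above) =====
theorem checkString_spec : Claim_equal_checkString := by
  intro s _
  unfold Spec_checkString checkString_alt
  rw [Bool.eq_iff_iff, checkString_iff, pvScan_false]
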